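-- pv_equiv track=rewrite | github.com/theabbie/leetcode | miscellaneous/A_New_Scheme.py | check
-- ===== SOURCE A (Python) =====
-- def check(arr):
--     n = len(arr)
--     for i in range(n - 1):
--         if arr[i] > arr[i + 1]:
--             return "No"
--     for el in arr:
--         if not 100 <= el <= 675:
--             return "No"
--         if el % 25 != 0:
--             return "No"
--     return "Yes"
-- ===== SOURCE B (Python) =====
-- def check(arr):
--     if arr == sorted(arr) and all(100 <= el <= 675 and el % 25 == 0 for el in arr):
--         return "Yes"
--     return "No"
-- ===== Notes on version B (the rewrite author's own statement) =====
-- stated objective: idiomatic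
-- what changed: Replaces the index-based adjacent-pair scan with a sorted-copy comparison (arr == sorted(arr)) and folds the two early-return loops into a single boolean expression with all(...).
import Mathlib
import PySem

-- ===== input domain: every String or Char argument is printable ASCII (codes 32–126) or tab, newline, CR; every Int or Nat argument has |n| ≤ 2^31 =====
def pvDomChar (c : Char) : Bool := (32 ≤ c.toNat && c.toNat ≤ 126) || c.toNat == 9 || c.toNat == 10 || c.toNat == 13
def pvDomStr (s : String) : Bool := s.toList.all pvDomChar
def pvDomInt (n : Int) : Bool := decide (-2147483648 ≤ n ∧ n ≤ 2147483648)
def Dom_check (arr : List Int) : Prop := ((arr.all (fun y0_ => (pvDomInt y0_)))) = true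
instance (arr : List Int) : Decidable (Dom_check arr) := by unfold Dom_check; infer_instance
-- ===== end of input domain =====

-- B replaces A's index-based adjacent-pair scan by comparing arr with a sorted copy, and the
-- second early-return loop by a single all(...) condition (idiomatic; return value only).

-- ===== PORT A =====
-- first loop: for i in range(n-1): if arr[i] > arr[i+1]: return "No"  (early return = any)
def check (arr : List Int) : String :=
  let n : Int := arr.length
  if (PySem.List.pyRange 0 (n - 1) 1).any
      (fun i => decide (PySem.List.pyGetD arr (i + 1) 0 < PySem.List.pyGetD arr i 0)) then "No"
  else if arr.any (fun el => !(decide (100 ≤ el ∧ el ≤ 675)) || decide (PySem.Int.mod el 25 ≠ 0)) then "No"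
  else "Yes"

-- ===== PORT B =====
def check_alt (arr : List Int) : String :=
  if arr = PySem.List.sorted arr id
      ∧ arr.all (fun el => decide (100 ≤ el ∧ el ≤ 675) && decide (PySem.Int.mod el 25 = 0)) = true
  then "Yes" else "No"

-- ===== PRECONDITION & SPEC =====
def Spec_check (arr : List Int) (out : String) : Prop := out = check_alt arr
instance (arr : List Int) (out : String) : Decidable (Spec_check arr out) := by unfold Spec_check; infer_instance

-- ===== CLAIM (what is proved, stated in full; the proofs are below) =====
def Claim_equal_check : Prop := ∀ (arr : List Int), Dom_check arr → Spec_check arr (check arr)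

-- ===== LEMMAS AND PROOFS =====

-- adjacent order implies full pairwise order (transitivity of ≤)
lemma adj_pairwise (arr : List Int)
    (h : ∀ k, k + 1 < arr.length → arr.getD k 0 ≤ arr.getD (k+1) 0) :
    arr.Pairwise (· ≤ ·) := by
  rw [List.pairwise_iff_getElem]
  intro i j hi hj hij
  induction j with
  | zero => omega
  | succ m ih =>
    have hadj : arr[m] ≤ arr[m+1] := by
      have := h m hj
      rwa [List.getD_eq_getElem?_getD, List.getD_eq_getElem?_getD,
           List.getElem?_eq_getElem (by omega), List.getElem?_eq_getElem (by omega),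
           Option.getD_some, Option.getD_some] at this
    rcases Nat.lt_succ_iff_lt_or_eq.mp hij with h' | h'
    · exact le_trans (ih (by omega) h') hadj
    · subst h'; exact hadj

-- A's adjacent scan finds no inversion iff the list is pairwise ordered
lemma no_inversion_iff (arr : List Int) :
    ((PySem.List.pyRange 0 ((arr.length : Int) - 1) 1).any
      (fun i => decide (PySem.List.pyGetD arr (i + 1) 0 < PySem.List.pyGetD arr i 0)) = false)
    ↔ arr.Pairwise (· ≤ ·) := by
  simp only [List.any_eq_false]
  constructor
  · intro h
    apply adj_pairwise
    intro k hk
    have hmem : ((k : Int)) ∈ PySem.List.pyRange 0 ((arr.length : Int) - 1) 1 := by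
      rw [PySem.List.mem_pyRange_one]; omega
    have hle := h _ hmem
    simp only [decide_eq_true_eq, not_lt] at hle
    have hcast : ((k : Int) + 1) = ((k + 1 : Nat) : Int) := by push_cast; ring
    rwa [hcast, PySem.List.pyGetD_natCast, PySem.List.pyGetD_natCast] at hle
  · intro h i hmem
    rw [PySem.List.mem_pyRange_one] at hmem
    have hi : i = ((i.toNat : Nat) : Int) := by omega
    rw [hi, show ((i.toNat : Int) + 1) = ((i.toNat + 1 : Nat) : Int) by push_cast; ring,
        PySem.List.pyGetD_natCast, PySem.List.pyGetD_natCast]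
    simp only [decide_eq_true_eq, not_lt]
    have := (List.pairwise_iff_getElem.mp h) i.toNat (i.toNat + 1)
      (by omega) (by omega) (by omega)
    rwa [List.getD_eq_getElem?_getD, List.getD_eq_getElem?_getD,
         List.getElem?_eq_getElem (by omega), List.getElem?_eq_getElem (by omega),
         Option.getD_some, Option.getD_some]

lemma sorted_self_iff (arr : List Int) :
    arr = PySem.List.sorted arr id ↔ arr.Pairwise (· ≤ ·) := by
  constructor
  · intro h
    have := PySem.List.sorted_pairwise (xs := arr) (key := id)
    rw [← h] at this
    simpa using this
  · intro h
    exact Eq.symm (PySem.List.sorted_eq_self_of_pairwise arr id (by simpa using h))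

-- A's second early-return loop is the negation of B's all(...) condition
lemma any_bad_eq (arr : List Int) :
    (arr.any fun el => !(decide (100 ≤ el ∧ el ≤ 675)) || decide (PySem.Int.mod el 25 ≠ 0))
    = !(arr.all fun el => decide (100 ≤ el ∧ el ≤ 675) && decide (PySem.Int.mod el 25 = 0)) := by
  induction arr with
  | nil => rfl
  | cons x xs ih =>
    rw [List.any_cons, List.all_cons, ih]
    simp only [Bool.not_and, ne_eq, decide_not, Bool.or_assoc]

-- ===== VERDICT (by name: the statement is the Claim_ definition above) =====
theorem check_spec : Claim_equal_check := by
  intro arr _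
  unfold Spec_check
  simp only [check, check_alt]
  rw [any_bad_eq]
  by_cases hs : arr.Pairwise (· ≤ ·)
  · rw [(no_inversion_iff arr).mpr hs]
    cases hall : (arr.all fun el => decide (100 ≤ el ∧ el ≤ 675) && decide (PySem.Int.mod el 25 = 0)) with
    | false =>
      simp only [Bool.false_eq_true, if_false, Bool.not_false, if_true]
      rw [if_neg]
      rintro ⟨-, hG⟩
      exact hG
    | true =>
      simp only [Bool.false_eq_true, if_false, Bool.not_true]
      rw [if_pos ⟨(sorted_self_iff arr).mpr hs, trivial⟩]
  · have hinv : ((PySem.List.pyRange 0 ((arr.length : Int) - 1) 1).any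
        (fun i => decide (PySem.List.pyGetD arr (i + 1) 0 < PySem.List.pyGetD arr i 0))) = true := by
      rcases Bool.eq_false_or_eq_true ((PySem.List.pyRange 0 ((arr.length : Int) - 1) 1).any
        (fun i => decide (PySem.List.pyGetD arr (i + 1) 0 < PySem.List.pyGetD arr i 0))) with h | h
      · exact h
      · exact absurd ((no_inversion_iff arr).mp h) hs
    rw [hinv]
    simp only [if_true]
    rw [if_neg]
    rintro ⟨h, -⟩
    exact hs ((sorted_self_iff arr).mp h)
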